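-- pv_equiv track=rewrite | github.com/tommysarni/IVid | contours.py | is_contour_good
-- ===== SOURCE A (Python) =====
-- def is_contour_good(c, pt1, pt2):
--
--     arr = c[0]
--     for point in arr:
--         x = point[0]
--         y = point[1]
--         if x > max(pt1[0], pt2[0]) or x < min(pt1[0], pt2[0]) or y > max(pt1[1], pt2[1]) or y < min(pt1[1], pt2[1]):
--             return False
--     return True
-- ===== SOURCE B (Python) =====
-- def is_contour_good(c, pt1, pt2):
--     arr = c[0]
--     if not arr:
--         return True
--     xs = [p[0] for p in arr]
--     ys = [p[1] for p in arr]
--     return (max(xs) <= max(pt1[0], pt2[0]) and min(xs) >= min(pt1[0], pt2[0])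
--             and max(ys) <= max(pt1[1], pt2[1]) and min(ys) >= min(pt1[1], pt2[1]))
-- ===== Notes on version B (the rewrite author's own statement) =====
-- stated objective: alternative
-- what changed: Replaces the per-point early-exit loop by one aggregate pass: collect all x and y coordinates, take their min/max once, and compare the four extremes against the bounding box.
-- outside the precondition, e.g. on is_contour_good([[[10, 10], [1]]], [0, 0], [5, 5]): A returns False, B raises IndexError
import Mathlib
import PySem

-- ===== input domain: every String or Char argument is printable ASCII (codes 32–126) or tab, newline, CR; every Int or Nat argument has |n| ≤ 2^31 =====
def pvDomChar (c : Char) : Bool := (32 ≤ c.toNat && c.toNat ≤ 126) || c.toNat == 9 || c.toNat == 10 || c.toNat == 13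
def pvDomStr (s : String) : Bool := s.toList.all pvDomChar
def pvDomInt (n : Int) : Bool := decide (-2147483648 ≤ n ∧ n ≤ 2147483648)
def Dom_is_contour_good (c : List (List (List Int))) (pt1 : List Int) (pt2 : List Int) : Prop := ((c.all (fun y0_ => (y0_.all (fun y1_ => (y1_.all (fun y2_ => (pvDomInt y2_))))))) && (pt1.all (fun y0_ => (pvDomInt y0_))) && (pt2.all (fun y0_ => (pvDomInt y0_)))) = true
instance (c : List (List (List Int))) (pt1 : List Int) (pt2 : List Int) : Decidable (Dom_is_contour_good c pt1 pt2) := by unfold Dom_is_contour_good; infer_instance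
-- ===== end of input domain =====

-- B replaces A's per-point early-exit loop by one aggregate min/max reduction; objective: alternative.

-- ===== PORT A =====
-- the original for-loop with early return False, as structural recursion over arr
def icgLoop (pt1 pt2 : List Int) : List (List Int) → Bool
  | [] => true
  | p :: rest =>
    let x := PySem.List.pyGetD p 0 0
    let y := PySem.List.pyGetD p 1 0
    if (x > max (PySem.List.pyGetD pt1 0 0) (PySem.List.pyGetD pt2 0 0)) ||
       (x < min (PySem.List.pyGetD pt1 0 0) (PySem.List.pyGetD pt2 0 0)) ||
       (y > max (PySem.List.pyGetD pt1 1 0) (PySem.List.pyGetD pt2 1 0)) ||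
       (y < min (PySem.List.pyGetD pt1 1 0) (PySem.List.pyGetD pt2 1 0)) then false
    else icgLoop pt1 pt2 rest

def is_contour_good (c : List (List (List Int))) (pt1 : List Int) (pt2 : List Int) : Bool :=
  let arr := PySem.List.pyGetD c 0 []
  icgLoop pt1 pt2 arr

-- ===== PORT B =====
def is_contour_good_alt (c : List (List (List Int))) (pt1 : List Int) (pt2 : List Int) : Bool :=
  let arr := PySem.List.pyGetD c 0 []
  if arr.isEmpty then true
  else
    let xs := arr.map (fun p => PySem.List.pyGetD p 0 0)
    let ys := arr.map (fun p => PySem.List.pyGetD p 1 0)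
    ((PySem.List.max? xs (fun v => v)).getD 0 ≤ max (PySem.List.pyGetD pt1 0 0) (PySem.List.pyGetD pt2 0 0)) &&
    ((PySem.List.min? xs (fun v => v)).getD 0 ≥ min (PySem.List.pyGetD pt1 0 0) (PySem.List.pyGetD pt2 0 0)) &&
    ((PySem.List.max? ys (fun v => v)).getD 0 ≤ max (PySem.List.pyGetD pt1 1 0) (PySem.List.pyGetD pt2 1 0)) &&
    ((PySem.List.min? ys (fun v => v)).getD 0 ≥ min (PySem.List.pyGetD pt1 1 0) (PySem.List.pyGetD pt2 1 0))

-- ===== PRECONDITION & SPEC =====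
-- Pre_ excludes inputs where Python A raises (c empty; with a nonempty contour, a point or a
-- bounding-box corner with fewer than 2 coordinates).  It also excludes a short-circuit artefact:
-- A can return False at an early out-of-range point before ever reading a later malformed point,
-- while B builds the full coordinate lists first and raises there (see cites).
def Pre_is_contour_good (c : List (List (List Int))) (pt1 : List Int) (pt2 : List Int) : Prop :=
  c ≠ [] ∧ (c.headD [] ≠ [] →
    2 ≤ pt1.length ∧ 2 ≤ pt2.length ∧ ∀ p ∈ c.headD [], 2 ≤ p.length)
instance (c : List (List (List Int))) (pt1 : List Int) (pt2 : List Int) : Decidable (Pre_is_contour_good c pt1 pt2) := by unfold Pre_is_contour_good; infer_instance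

def pvWitness_is_contour_good : List (List (List Int)) × List Int × List Int :=
  ([[[1, 1], [2, 0]]], [0, 0], [3, 3])

def Spec_is_contour_good (c : List (List (List Int))) (pt1 : List Int) (pt2 : List Int) (out : Bool) : Prop := out = is_contour_good_alt c pt1 pt2
instance (c : List (List (List Int))) (pt1 : List Int) (pt2 : List Int) (out : Bool) : Decidable (Spec_is_contour_good c pt1 pt2 out) := by unfold Spec_is_contour_good; infer_instance

-- ===== CLAIM (what is proved, stated in full; the proofs are below) =====
def Claim_equal_is_contour_good : Prop := ∀ (c : List (List (List Int))) (pt1 : List Int) (pt2 : List Int), Dom_is_contour_good c pt1 pt2 → Pre_is_contour_good c pt1 pt2 → Spec_is_contour_good c pt1 pt2 (is_contour_good c pt1 pt2)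

-- ===== LEMMAS AND PROOFS =====
theorem foldl_max_le (t : List Int) (x B : Int) :
    t.foldl max x ≤ B ↔ x ≤ B ∧ ∀ y ∈ t, y ≤ B := by
  induction t generalizing x with
  | nil => simp
  | cons a t ih =>
    simp only [List.foldl_cons, ih, List.mem_cons]
    constructor
    · rintro ⟨h1, h2⟩
      refine ⟨le_trans (le_max_left _ _) h1, fun y hy => ?_⟩
      rcases hy with rfl | hy
      · exact le_trans (le_max_right _ _) h1
      · exact h2 y hy
    · rintro ⟨h1, h2⟩
      exact ⟨max_le h1 (h2 a (Or.inl rfl)), fun y hy => h2 y (Or.inr hy)⟩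

theorem le_foldl_min (t : List Int) (x b : Int) :
    b ≤ t.foldl min x ↔ b ≤ x ∧ ∀ y ∈ t, b ≤ y := by
  induction t generalizing x with
  | nil => simp
  | cons a t ih =>
    simp only [List.foldl_cons, ih, List.mem_cons]
    constructor
    · rintro ⟨h1, h2⟩
      refine ⟨le_trans h1 (min_le_left _ _), fun y hy => ?_⟩
      rcases hy with rfl | hy
      · exact le_trans h1 (min_le_right _ _)
      · exact h2 y hy
    · rintro ⟨h1, h2⟩
      exact ⟨le_min h1 (h2 a (Or.inl rfl)), fun y hy => h2 y (Or.inr hy)⟩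

theorem icgLoop_eq_all (pt1 pt2 : List Int) (arr : List (List Int)) :
    icgLoop pt1 pt2 arr
      = arr.all (fun p =>
          !((PySem.List.pyGetD p 0 0 > max (PySem.List.pyGetD pt1 0 0) (PySem.List.pyGetD pt2 0 0)) ||
            (PySem.List.pyGetD p 0 0 < min (PySem.List.pyGetD pt1 0 0) (PySem.List.pyGetD pt2 0 0)) ||
            (PySem.List.pyGetD p 1 0 > max (PySem.List.pyGetD pt1 1 0) (PySem.List.pyGetD pt2 1 0)) ||
            (PySem.List.pyGetD p 1 0 < min (PySem.List.pyGetD pt1 1 0) (PySem.List.pyGetD pt2 1 0)))) := by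
  induction arr with
  | nil => rfl
  | cons p rest ih =>
    simp only [icgLoop, List.all_cons, ih]
    split_ifs with h
    · simp only [h, Bool.not_true, Bool.false_and]
    · simp only [Bool.not_eq_true] at h
      simp only [h, Bool.not_false, Bool.true_and]

theorem icg_forall_mem_and {α : Type} (l : List α) (P Q : α → Prop) :
    (∀ x ∈ l, P x ∧ Q x) ↔ (∀ x ∈ l, P x) ∧ (∀ x ∈ l, Q x) :=
  ⟨fun h => ⟨fun x hx => (h x hx).1, fun x hx => (h x hx).2⟩,
   fun h x hx => ⟨h.1 x hx, h.2 x hx⟩⟩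

theorem icg_key (pt1 pt2 : List Int) (arr : List (List Int)) :
    icgLoop pt1 pt2 arr =
      (if arr.isEmpty then true else
        ((PySem.List.max? (arr.map (fun p => PySem.List.pyGetD p 0 0)) (fun v => v)).getD 0 ≤ max (PySem.List.pyGetD pt1 0 0) (PySem.List.pyGetD pt2 0 0)) &&
        ((PySem.List.min? (arr.map (fun p => PySem.List.pyGetD p 0 0)) (fun v => v)).getD 0 ≥ min (PySem.List.pyGetD pt1 0 0) (PySem.List.pyGetD pt2 0 0)) &&
        ((PySem.List.max? (arr.map (fun p => PySem.List.pyGetD p 1 0)) (fun v => v)).getD 0 ≤ max (PySem.List.pyGetD pt1 1 0) (PySem.List.pyGetD pt2 1 0)) &&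
        ((PySem.List.min? (arr.map (fun p => PySem.List.pyGetD p 1 0)) (fun v => v)).getD 0 ≥ min (PySem.List.pyGetD pt1 1 0) (PySem.List.pyGetD pt2 1 0))) := by
  cases arr with
  | nil => rfl
  | cons p rest =>
    rw [icgLoop_eq_all]
    simp only [List.isEmpty_cons, Bool.false_eq_true, if_false, List.map_cons,
      PySem.List.max?_id_cons, PySem.List.min?_id_cons, Option.getD_some]
    rw [Bool.eq_iff_iff]
    simp only [List.all_eq_true, Bool.and_eq_true, decide_eq_true_eq,
      ge_iff_le, foldl_max_le, le_foldl_min, Bool.not_or, Bool.and_eq_true,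
      Bool.not_eq_true', decide_eq_false_iff_not, not_lt, List.forall_mem_map,
      List.forall_mem_cons, and_assoc, icg_forall_mem_and]
    tauto

theorem is_contour_good_spec : Claim_equal_is_contour_good := by
  unfold Claim_equal_is_contour_good
  intro c pt1 pt2 _ _
  exact icg_key pt1 pt2 (PySem.List.pyGetD c 0 [])
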